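-- pv_equiv track=rewrite | github.com/sio/HomeLibraryCatalog | hlc/util.py | unmangle
-- ===== SOURCE A (Python) =====
-- def unmangle(text, streams=3, padding="_"):
--     """Reverse string produced by mangle() method to original"""
--     if streams < 2:
--         streams = 2
--     if len(text) % streams:
--         raise ValueError("incorrect padding: %s" % text)
--
--     pieces = list()
--     piece_len = int(len(text) / streams)
--     for s in range(streams):
--         pieces.append(text[s*piece_len:(s+1)*piece_len])
--
--     readable = str()
--     for chars in zip(*pieces):
--         readable += "".join(chars)
--     return readable.strip(padding)
-- ===== SOURCE B (Python) =====
-- def unmangle(text, streams=3, padding="_"):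
--     """Reverse string produced by mangle() method to original"""
--     streams = max(streams, 2)
--     if len(text) % streams:
--         raise ValueError("incorrect padding: %s" % text)
--     piece_len = len(text) // streams
--     readable = "".join(text[(p % streams) * piece_len + p // streams]
--                        for p in range(len(text)))
--     return readable.strip(padding)
-- ===== Notes on version B (the rewrite author's own statement) =====
-- stated objective: alternative
-- what changed: B drops the pieces list and the zip(*pieces) transpose entirely: it rebuilds the readable string in one pass over output positions using the closed-form inverse permutation text[(p % streams)*piece_len + p//streams].
import Mathlib
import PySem

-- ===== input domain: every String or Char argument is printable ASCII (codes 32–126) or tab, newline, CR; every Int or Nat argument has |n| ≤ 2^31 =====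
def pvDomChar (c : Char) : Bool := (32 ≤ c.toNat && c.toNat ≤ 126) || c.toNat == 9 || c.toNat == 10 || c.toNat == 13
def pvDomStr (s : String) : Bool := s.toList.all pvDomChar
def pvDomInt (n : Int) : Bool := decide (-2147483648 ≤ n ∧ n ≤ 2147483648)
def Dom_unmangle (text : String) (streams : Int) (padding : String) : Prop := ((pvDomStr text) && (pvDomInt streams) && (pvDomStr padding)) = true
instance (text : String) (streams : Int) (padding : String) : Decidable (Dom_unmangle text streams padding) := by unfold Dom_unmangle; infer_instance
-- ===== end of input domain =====

-- B rebuilds the readable string in one direct pass over output positions via the closed-form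
-- inverse permutation, instead of slicing the text into pieces and transposing them with zip.

-- ===== PORT A =====
-- zip(*pieces): columns of the pieces, stopping at the first exhausted piece (Python zip semantics)
def pyZipAux (l0 : List Char) (rest : List (List Char)) : List (List Char) :=
  match l0 with
  | [] => []
  | c :: cs =>
    if rest.all (fun l => !l.isEmpty) then
      (c :: rest.map (fun l => l.headD ' ')) :: pyZipAux cs (rest.map List.tail)
    else []

def pyZipStar (ls : List (List Char)) : List (List Char) :=
  match ls with
  | [] => []
  | l0 :: rest => pyZipAux l0 rest

def unmangle (text : String) (streams : Int) (padding : String) : String :=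
  let streams := if streams < 2 then 2 else streams
  -- int(len(text) / streams): truncating division (exact on the admitted inputs)
  let pieceLen : Int := PySem.Int.truncdiv ((text.toList.length : Int)) streams
  let pieces : List (List Char) :=
    (PySem.List.pyRange 0 streams 1).foldl
      (fun acc s => acc ++ [PySem.List.slice text.toList (some (s * pieceLen)) (some ((s + 1) * pieceLen))]) []
  let readable : List Char := (pyZipStar pieces).foldl (fun acc chars => acc ++ chars) []
  String.ofList (PySem.Chars.stripChars readable padding.toList)

-- ===== PORT B =====
def unmangle_alt (text : String) (streams : Int) (padding : String) : String :=
  let streams := max streams 2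
  let cs := text.toList
  let n : Int := (cs.length : Int)
  let pieceLen : Int := PySem.Int.floordiv n streams
  -- text[idx]: the index is always in range on the admitted inputs, so getD's default never fires
  let readable : List Char :=
    (PySem.List.pyRange 0 n 1).map (fun p =>
      PySem.List.pyGetD cs (PySem.Int.mod p streams * pieceLen + PySem.Int.floordiv p streams) ' ')
  String.ofList (PySem.Chars.stripChars readable padding.toList)

-- ===== PRECONDITION & SPEC =====
-- A raises ValueError exactly when len(text) is not a multiple of the (coerced) stream count.
def Pre_unmangle (text : String) (streams : Int) (padding : String) : Prop :=
  PySem.Int.mod ((text.toList.length : Int)) (max streams 2) = 0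
instance (text : String) (streams : Int) (padding : String) : Decidable (Pre_unmangle text streams padding) := by unfold Pre_unmangle; infer_instance

def pvWitness_unmangle : String × Int × String := ("ab_c__", 3, "_")

def Spec_unmangle (text : String) (streams : Int) (padding : String) (out : String) : Prop := out = unmangle_alt text streams padding
instance (text : String) (streams : Int) (padding : String) (out : String) : Decidable (Spec_unmangle text streams padding out) := by unfold Spec_unmangle; infer_instance

-- ===== CLAIM (what is proved, stated in full; the proofs are below) =====
def Claim_equal_unmangle : Prop := ∀ (text : String) (streams : Int) (padding : String), Dom_unmangle text streams padding → Pre_unmangle text streams padding → Spec_unmangle text streams padding (unmangle text streams padding)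

-- ===== LEMMAS AND PROOFS =====

lemma if_lt_two_eq_max (s : Int) : (if s < 2 then (2 : Int) else s) = max s 2 := by
  rw [max_def]; split_ifs <;> omega

lemma truncdiv_natCast (m k : Nat) : PySem.Int.truncdiv (m : Int) (k : Int) = ((m / k : Nat) : Int) := by
  simp [PySem.Int.truncdiv, Int.tdiv]

-- the column j of pyZipAux over equal-length lists
lemma pyZipAux_spec : ∀ (l0 : List Char) (rest : List (List Char)) (L : Nat),
    l0.length = L → (∀ l ∈ rest, l.length = L) →
    pyZipAux l0 rest =
      (List.range L).map (fun j => l0.getD j ' ' :: rest.map (fun l => l.getD j ' ')) := by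
  intro l0
  induction l0 with
  | nil =>
    intro rest L h0 _
    subst h0
    simp [pyZipAux]
  | cons c cs ih =>
    intro rest L h0 hrest
    have hL : L = cs.length + 1 := by simpa using h0.symm
    subst hL
    have hne : rest.all (fun l => !l.isEmpty) = true := by
      simp only [List.all_eq_true]
      intro l hl
      have h := hrest l hl
      cases l with
      | nil => simp at h
      | cons a t => simp
    rw [pyZipAux, hne, if_pos rfl]
    have ihr := ih (rest.map List.tail) cs.length rfl ?tails
    case tails =>
      intro l hl
      rcases List.mem_map.mp hl with ⟨l', hl', rfl⟩
      have h := hrest l' hl'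
      cases l' with
      | nil => simp at h
      | cons a t => simpa using h
    rw [ihr, List.range_succ_eq_map, List.map_cons]
    congr 1
    · simp only [List.getD_cons_zero]
      congr 1
      apply List.map_congr_left
      intro l hl
      have h := hrest l hl
      cases l with
      | nil => simp at h
      | cons a t => simp
    · rw [List.map_map]
      apply List.map_congr_left
      intro j _
      simp only [Function.comp_apply, Nat.succ_eq_add_one, List.getD_cons_succ]
      congr 1
      rw [List.map_map]
      apply List.map_congr_left
      intro l hl
      have h := hrest l hl
      cases l with
      | nil => simp at h
      | cons a t => simp

lemma pyZipStar_spec (l0 : List Char) (rest : List (List Char)) (L : Nat)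
    (hlen : ∀ l ∈ l0 :: rest, l.length = L) :
    pyZipStar (l0 :: rest) =
      (List.range L).map (fun j => (l0 :: rest).map (fun l => l.getD j ' ')) := by
  rw [pyZipStar, pyZipAux_spec l0 rest L (hlen l0 (by simp)) (fun l hl => hlen l (by simp [hl]))]
  simp

-- the closed-form permutation enumerates exactly the columns of the transpose
lemma interleave_eq (s : Nat) (hs : 0 < s) (h : Nat → Nat → Char) : ∀ (L : Nat),
    (List.range (L * s)).map (fun p => h (p % s) (p / s)) =
      (List.range L).flatMap (fun j => (List.range s).map (fun k => h k j)) := by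
  intro L
  induction L with
  | zero => simp
  | succ L ih =>
    rw [Nat.succ_mul, List.range_add, List.map_append, ih, List.range_succ,
        List.flatMap_append]
    congr 1
    simp only [List.flatMap_cons, List.flatMap_nil, List.append_nil, List.map_map]
    apply List.map_congr_left
    intro k hk
    have hk' : k < s := List.mem_range.mp hk
    have h1 : (L * s + k) % s = k := by
      rw [Nat.add_comm, Nat.add_mul_mod_self_right]; exact Nat.mod_eq_of_lt hk'
    have h2 : (L * s + k) / s = L := by
      rw [Nat.add_comm, Nat.add_mul_div_right _ _ hs, Nat.div_eq_of_lt hk']; omega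
    simp [Function.comp, h1, h2]

-- a column entry of a chunk is the corresponding character of the text
lemma chunk_getD (cs : List Char) (L k j : Nat) (hj : j < L) :
    ((cs.drop (k * L)).take L).getD j ' ' = cs.getD (k * L + j) ' ' := by
  rw [List.getD_eq_getElem?_getD, List.getD_eq_getElem?_getD, List.getElem?_take,
      if_pos hj, List.getElem?_drop]

lemma chunk_length (cs : List Char) (L k : Nat) (hbound : k * L + L ≤ cs.length) :
    ((cs.drop (k * L)).take L).length = L := by
  simp only [List.length_take, List.length_drop]
  omega

theorem unmangle_spec_aux (text : String) (streams : Int) (padding : String)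
    (hpre : Pre_unmangle text streams padding) :
    unmangle text streams padding = unmangle_alt text streams padding := by
  obtain ⟨sN, hsN2, hsN⟩ : ∃ sN : Nat, 2 ≤ sN ∧ max streams 2 = (sN : Int) :=
    ⟨(max streams 2).toNat, by omega, by omega⟩
  have hs0 : 0 < sN := by omega
  set cs := text.toList with hcs
  set n := cs.length with hn
  -- the precondition: sN divides n
  have hdvd : n % sN = 0 := by
    unfold Pre_unmangle at hpre
    rw [hsN, ← hcs, ← hn, PySem.Int.mod_natCast] at hpre
    exact_mod_cast hpre
  set L := n / sN with hL
  have hnL' : n = sN * L := by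
    rw [hL, Nat.mul_div_cancel' (Nat.dvd_of_mod_eq_zero hdvd)]
  simp only [unmangle, unmangle_alt, if_lt_two_eq_max, hsN, ← hcs, ← hn]
  rw [truncdiv_natCast, PySem.Int.floordiv_natCast, ← hL]
  -- pieces list on the A side
  rw [PySem.List.foldl_append_singleton_eq_map, List.nil_append,
      PySem.List.pyRange_zero_nat, List.map_map]
  -- each piece is a chunk
  have hpieces : (List.range sN).map ((fun s => PySem.List.slice cs (some (s * (L : Int))) (some ((s + 1) * (L : Int)))) ∘ (fun k : Nat => (k : Int)))
      = (List.range sN).map (fun k => (cs.drop (k * L)).take L) := by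
    apply List.map_congr_left
    intro k hk
    simp only [Function.comp_apply]
    have e1 : ((k : Int) * (L : Int)) = ((k * L : Nat) : Int) := by push_cast; ring
    have e2 : (((k : Int) + 1) * (L : Int)) = (((k + 1) * L : Nat) : Int) := by push_cast; ring
    rw [e1, e2, PySem.List.slice_natCast]
    congr 1
    rw [Nat.add_mul, one_mul, Nat.add_sub_cancel_left]
  rw [hpieces]
  have hbound : ∀ k : Nat, k < sN → k * L + L ≤ n := by
    intro k hk
    calc k * L + L = (k + 1) * L := by ring
    _ ≤ sN * L := Nat.mul_le_mul_right _ (by omega)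
    _ = n := hnL'.symm
  -- transpose via pyZipStar
  obtain ⟨m, hm⟩ : ∃ m, sN = m + 1 := ⟨sN - 1, by omega⟩
  have hcons : (List.range sN).map (fun k => (cs.drop (k * L)).take L)
      = ((cs.drop (0 * L)).take L) :: (((List.range m).map (fun k => (cs.drop ((k + 1) * L)).take L))) := by
    rw [hm, List.range_succ_eq_map]
    simp [List.map_map, Function.comp, Nat.succ_eq_add_one]
  have hlenall : ∀ l ∈ ((cs.drop (0 * L)).take L) :: (((List.range m).map (fun k => (cs.drop ((k + 1) * L)).take L))), l.length = L := by
    rw [← hcons]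
    intro l hl
    rcases List.mem_map.mp hl with ⟨k, hk, rfl⟩
    exact chunk_length cs L k (hbound k (List.mem_range.mp hk))
  rw [hcons, pyZipStar_spec _ _ L hlenall, ← hcons]
  rw [PySem.List.foldl_append_eq_flatten, List.nil_append, ← List.flatMap_def]
  -- A side is now the flatMap of the columns; each column entry is a character of the text
  have hAcol : (List.range L).flatMap
        (fun j => ((List.range sN).map (fun k => (cs.drop (k * L)).take L)).map (fun l => l.getD j ' '))
      = (List.range L).flatMap (fun j => (List.range sN).map (fun k => cs.getD (k * L + j) ' ')) := by
    apply List.flatMap_congr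
    intro j hj
    rw [List.map_map]
    apply List.map_congr_left
    intro k hk
    simp only [Function.comp_apply]
    exact chunk_getD cs L k j (List.mem_range.mp hj)
  rw [hAcol]
  -- B side: the closed-form index map
  rw [PySem.List.pyRange_zero_nat, List.map_map]
  have hBmap : (List.range n).map ((fun p => PySem.List.pyGetD cs (PySem.Int.mod p (sN : Int) * (L : Int) + PySem.Int.floordiv p (sN : Int)) ' ') ∘ (fun k : Nat => (k : Int)))
      = (List.range n).map (fun p => cs.getD ((p % sN) * L + p / sN) ' ') := by
    apply List.map_congr_left
    intro p _
    simp only [Function.comp_apply, PySem.Int.mod_natCast, PySem.Int.floordiv_natCast]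
    have e : ((p % sN : Nat) : Int) * (L : Int) + ((p / sN : Nat) : Int) = (((p % sN) * L + p / sN : Nat) : Int) := by push_cast; ring
    rw [e, PySem.List.pyGetD_natCast]
  rw [hBmap]
  have hfinal := interleave_eq sN hs0 (fun k j => cs.getD (k * L + j) ' ') L
  rw [Nat.mul_comm L sN, ← hnL'] at hfinal
  rw [hfinal]

-- ===== VERDICT (by name: the statement is the Claim_ definition above) =====
theorem unmangle_spec : Claim_equal_unmangle := by
  intro text streams padding _ hpre
  unfold Spec_unmangle
  exact unmangle_spec_aux text streams padding hpre
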